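-- pv_equiv track=rewrite | github.com/okhsunrog/archinstall_zfs | archinstall_zfs/zfs/kmod_setup.py | _rewrite_archzfs_repo_block
-- ===== SOURCE A (Python) =====
-- def _rewrite_archzfs_repo_block(content: str) -> str:
--     """Ensure [archzfs] block uses the official archzfs.com repo.
--
--     Replaces any existing [archzfs] block with a canonical stanza to avoid
--     pointing to unsupported or experimental sources that break dependency
--     resolution.
--     """
--     lines = content.splitlines()
--     start = None
--     end = None
--     for idx, line in enumerate(lines):
--         if line.strip().lower() == "[archzfs]":
--             start = idx
--             # Find the end of the block (next section or EOF)
--             for j in range(idx + 1, len(lines)):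
--                 if lines[j].startswith("[") and lines[j].endswith("]"):
--                     end = j
--                     break
--             if end is None:
--                 end = len(lines)
--             break
--     canonical = [
--         "[archzfs]",
--         "SigLevel = Never",
--         "Server = https://github.com/archzfs/archzfs/releases/download/experimental",
--         "",
--     ]
--     if start is None:
--         # No existing block, append at the end
--         if lines and lines[-1].strip():
--             lines.append("")
--         lines.extend(canonical)
--         return "\n".join(lines) + "\n"
--
--     # Replace existing block with canonical
--     new_lines = lines[:start] + canonical + lines[end:]
--     return "\n".join(new_lines) + "\n"
-- ===== SOURCE B (Python) =====
-- def _rewrite_archzfs_repo_block(content: str) -> str: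
--     """Single streaming pass: emit lines, splicing the canonical [archzfs] stanza
--     in place of the first [archzfs] block (or appending it if none exists)."""
--     canonical = [
--         "[archzfs]",
--         "SigLevel = Never",
--         "Server = https://github.com/archzfs/archzfs/releases/download/experimental",
--         "",
--     ]
--     out = []
--     done = False
--     skipping = False
--     for line in content.splitlines():
--         if not done and line.strip().lower() == "[archzfs]":
--             out.extend(canonical)
--             done = True
--             skipping = True
--         elif skipping and line.startswith("[") and line.endswith("]"):
--             skipping = False
--             out.append(line)
--         elif skipping:
--             pass
--         else:
--             out.append(line)
--     if not done:
--         if out and out[-1].strip():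
--             out.append("")
--         out.extend(canonical)
--     return "\n".join(out) + "\n"
-- ===== Notes on version B (the rewrite author's own statement) =====
-- stated objective: alternative
-- what changed: Replaces the index-hunting two-loop-plus-slicing structure (find start index, nested scan for end index, rebuild via list slices) with a single streaming pass over the lines that splices the canonical stanza in place using done/skipping flags.
import Mathlib
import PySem

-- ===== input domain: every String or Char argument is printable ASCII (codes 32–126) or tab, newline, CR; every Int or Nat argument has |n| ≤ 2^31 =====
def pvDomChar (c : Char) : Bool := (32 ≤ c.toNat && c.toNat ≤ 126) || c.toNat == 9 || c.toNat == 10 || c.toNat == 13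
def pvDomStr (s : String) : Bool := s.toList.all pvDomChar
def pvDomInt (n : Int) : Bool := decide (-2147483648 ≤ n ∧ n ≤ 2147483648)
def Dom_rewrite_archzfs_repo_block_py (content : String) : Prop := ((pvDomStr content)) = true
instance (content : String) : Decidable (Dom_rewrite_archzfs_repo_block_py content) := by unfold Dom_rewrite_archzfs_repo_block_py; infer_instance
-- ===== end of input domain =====

-- B replaces A's index-hunting (find start, nested scan for end, rebuild by list slices)
-- with a single streaming pass splicing the canonical stanza via done/skipping flags (objective: alternative).

-- shared literals (both Python sources contain these exact expressions)
def pvCanonical : List String :=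
  ["[archzfs]", "SigLevel = Never",
   "Server = https://github.com/archzfs/archzfs/releases/download/experimental", ""]

-- line.strip().lower() == "[archzfs]"
def pvIsHeader (l : String) : Bool :=
  PySem.Str.lower (PySem.Str.strip l) == "[archzfs]"

-- line.startswith("[") and line.endswith("]")
def pvIsSection (l : String) : Bool :=
  PySem.Str.startswith l "[" && PySem.Str.endswith l "]"

-- ===== PORT A =====
-- outer 'for idx, line in enumerate(lines): if …: start = idx; …; break'
def pvFindStart : List String → Nat → Option Nat
  | [], _ => none
  | l :: ls, i => if pvIsHeader l then some i else pvFindStart ls (i + 1)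

-- inner 'for j in range(idx+1, len(lines)): if …: end = j; break' (end is None → len(lines))
def pvFindEnd (lines : List String) (j : Nat) : Nat :=
  if h : j < lines.length then
    if pvIsSection lines[j] then j else pvFindEnd lines (j + 1)
  else lines.length
termination_by lines.length - j

def rewrite_archzfs_repo_block_py (content : String) : String :=
  let lines := PySem.Str.splitlines content
  match pvFindStart lines 0 with
  | none =>
      -- if lines and lines[-1].strip(): lines.append("")
      let lines2 :=
        match lines.getLast? with
        | some last => if PySem.Str.strip last ≠ "" then lines ++ [""] else lines
        | none => lines
      PySem.Str.join "\n" (lines2 ++ pvCanonical) ++ "\n"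
  | some s =>
      let e := pvFindEnd lines (s + 1)
      PySem.Str.join "\n" (lines.take s ++ pvCanonical ++ lines.drop e) ++ "\n"

-- ===== PORT B =====
-- the loop body of Source B; state = (out, done, skipping)
def pvStep (st : List String × Bool × Bool) (line : String) : List String × Bool × Bool :=
  match st with
  | (out, done, skipping) =>
    if !done && pvIsHeader line then (out ++ pvCanonical, true, true)
    else if skipping && pvIsSection line then (out ++ [line], done, false)
    else if skipping then (out, done, skipping)
    else (out ++ [line], done, skipping)

def rewrite_archzfs_repo_block_py_alt (content : String) : String :=
  let st := (PySem.Str.splitlines content).foldl pvStep ([], false, false)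
  let out := st.1
  let done := st.2.1
  let out2 :=
    if !done then
      -- if out and out[-1].strip(): out.append("")
      (match out.getLast? with
       | some last => if PySem.Str.strip last ≠ "" then out ++ [""] else out
       | none => out) ++ pvCanonical
    else out
  PySem.Str.join "\n" out2 ++ "\n"

-- ===== PRECONDITION & SPEC =====
def Spec_rewrite_archzfs_repo_block_py (content : String) (out : String) : Prop := out = rewrite_archzfs_repo_block_py_alt content
instance (content : String) (out : String) : Decidable (Spec_rewrite_archzfs_repo_block_py content out) := by unfold Spec_rewrite_archzfs_repo_block_py; infer_instance

-- ===== CLAIM (what is proved, stated in full; the proofs are below) =====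
def Claim_equal_rewrite_archzfs_repo_block_py : Prop := ∀ (content : String), Dom_rewrite_archzfs_repo_block_py content → Spec_rewrite_archzfs_repo_block_py content (rewrite_archzfs_repo_block_py content)

-- ===== LEMMAS AND PROOFS =====

-- once done ∧ ¬skipping, the fold copies the rest verbatim
theorem pvFold_done (ls : List String) : ∀ out : List String,
    ls.foldl pvStep (out, true, false) = (out ++ ls, true, false) := by
  induction ls with
  | nil => simp
  | cons l ls ih =>
      intro out
      simp only [List.foldl_cons, pvStep]
      simp [ih (out ++ [l])]

theorem pvFindEnd_cons (l : String) (ls : List String) : ∀ j,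
    pvFindEnd (l :: ls) (j + 1) = pvFindEnd ls j + 1 := by
  intro j
  induction hn : ls.length - j generalizing j with
  | zero =>
      unfold pvFindEnd
      have hj : ¬ j < ls.length := by omega
      simp [hj]
  | succ n ih =>
      have hj : j < ls.length := by omega
      have hR : pvFindEnd ls j = if pvIsSection ls[j] then j else pvFindEnd ls (j + 1) := by
        rw [pvFindEnd]; simp [hj]
      have hL : pvFindEnd (l :: ls) (j + 1) =
          if pvIsSection ls[j] then j + 1 else pvFindEnd (l :: ls) (j + 1 + 1) := by
        rw [pvFindEnd]; simp [hj]
      rw [hL, hR]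
      by_cases hs : pvIsSection ls[j] = true
      · simp [hs]
      · simp only [Bool.not_eq_true] at hs
        simp [hs]
        exact ih (j + 1) (by omega)

-- while skipping, the fold drops lines up to A's block end
theorem pvFold_skip_fst (ls : List String) : ∀ out : List String,
    (ls.foldl pvStep (out, true, true)).1 = out ++ ls.drop (pvFindEnd ls 0) := by
  induction ls with
  | nil => simp [pvFindEnd]
  | cons l ls ih =>
      intro out
      simp only [List.foldl_cons, pvStep]
      by_cases hs : pvIsSection l = true
      · have h0 : pvFindEnd (l :: ls) 0 = 0 := by
          unfold pvFindEnd; simp [hs]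
        simp [hs, pvFold_done, h0]
      · simp only [Bool.not_eq_true] at hs
        have h0 : pvFindEnd (l :: ls) 0 = pvFindEnd ls 0 + 1 := by
          rw [pvFindEnd]
          simp [hs, pvFindEnd_cons]
        simp [hs, ih out, h0]

theorem pvFold_skip_done (ls : List String) : ∀ out : List String,
    (ls.foldl pvStep (out, true, true)).2.1 = true := by
  induction ls with
  | nil => simp
  | cons l ls ih =>
      intro out
      simp only [List.foldl_cons, pvStep]
      by_cases hs : pvIsSection l = true
      · simp [hs, pvFold_done]
      · simp only [Bool.not_eq_true] at hs
        simp [hs, ih out]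

-- the main fold, characterised by A's two searches
theorem pvFold_main_fst (ls : List String) : ∀ out : List String,
    (ls.foldl pvStep (out, false, false)).1 =
      match pvFindStart ls 0 with
      | none => out ++ ls
      | some s => out ++ (ls.take s ++ pvCanonical ++ ls.drop (pvFindEnd ls (s + 1))) := by
  induction ls with
  | nil => simp [pvFindStart]
  | cons l ls ih =>
      intro out
      simp only [List.foldl_cons, pvStep]
      by_cases hh : pvIsHeader l = true
      · have hst : pvFindStart (l :: ls) 0 = some 0 := by simp [pvFindStart, hh]
        simp only [hh, Bool.not_false, Bool.true_and, reduceIte]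
        rw [pvFold_skip_fst]
        simp [hst, pvFindEnd_cons]
      · simp only [Bool.not_eq_true] at hh
        have hst1 : ∀ i, pvFindStart (l :: ls) i = (pvFindStart ls (i+1)) := by
          intro i; simp [pvFindStart, hh]
        have hmap : ∀ (xs : List String) i, pvFindStart xs (i + 1) = (pvFindStart xs i).map (· + 1) := by
          intro xs
          induction xs with
          | nil => intro i; simp [pvFindStart]
          | cons x xs ihx =>
              intro i
              by_cases hx : pvIsHeader x = true
              · simp [pvFindStart, hx]
              · simp only [Bool.not_eq_true] at hx
                simp [pvFindStart, hx, ihx]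
        simp only [hh, Bool.not_false, Bool.false_and, Bool.and_false, Bool.false_eq_true, if_false]
        rw [ih (out ++ [l])]
        rw [hst1 0, hmap ls 0]
        cases hfs : pvFindStart ls 0 with
        | none => simp
        | some s =>
            simp only [Option.map_some]
            rw [pvFindEnd_cons]
            simp

theorem pvFold_main_done (ls : List String) : ∀ out : List String,
    (ls.foldl pvStep (out, false, false)).2.1 = (pvFindStart ls 0).isSome := by
  induction ls with
  | nil => simp [pvFindStart]
  | cons l ls ih =>
      intro out
      simp only [List.foldl_cons, pvStep]
      by_cases hh : pvIsHeader l = true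
      · simp [hh, pvFold_skip_done, pvFindStart]
      · simp only [Bool.not_eq_true] at hh
        have hst1 : pvFindStart (l :: ls) 0 = pvFindStart ls 1 := by
          simp [pvFindStart, hh]
        have hmap : ∀ (xs : List String) i, pvFindStart xs (i + 1) = (pvFindStart xs i).map (· + 1) := by
          intro xs
          induction xs with
          | nil => intro i; simp [pvFindStart]
          | cons x xs ihx =>
              intro i
              by_cases hx : pvIsHeader x = true
              · simp [pvFindStart, hx]
              · simp only [Bool.not_eq_true] at hx
                simp [pvFindStart, hx, ihx]
        simp only [hh, Bool.not_false, Bool.false_and, Bool.and_false, Bool.false_eq_true, if_false]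
        rw [ih (out ++ [l]), hst1, hmap ls 0]
        cases pvFindStart ls 0 <;> simp

-- ===== VERDICT (by name: the statement is the Claim_ definition above) =====
theorem rewrite_archzfs_repo_block_py_spec : Claim_equal_rewrite_archzfs_repo_block_py := by
  intro content _
  unfold Spec_rewrite_archzfs_repo_block_py
  unfold rewrite_archzfs_repo_block_py rewrite_archzfs_repo_block_py_alt
  simp only
  rw [pvFold_main_fst, pvFold_main_done]
  cases hfs : pvFindStart (PySem.Str.splitlines content) 0 with
  | none => simp
  | some s => simp
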